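-- pv_equiv track=rewrite | github.com/d3v-null/rubbl | casatables/format_strace_for_diff.py | categorize_syscalls
-- ===== SOURCE A (Python) =====
-- def categorize_syscalls(syscalls):
--     """Categorize syscalls by type for better analysis."""
--     categories = {
--         'file_ops': [],
--         'memory': [],
--         'write_ops': [],
--         'read_ops': [],
--         'seek_ops': [],
--         'other': []
--     }
--
--     for line_num, syscall in syscalls:
--         if any(op in syscall for op in ['write(', 'pwrite']):
--             categories['write_ops'].append((line_num, syscall))
--         elif any(op in syscall for op in ['read(', 'pread']):
--             categories['read_ops'].append((line_num, syscall))
--         elif 'lseek(' in syscall: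
--             categories['seek_ops'].append((line_num, syscall))
--         elif any(op in syscall for op in ['open', 'close', 'mkdir', 'fsync', 'fstat']):
--             categories['file_ops'].append((line_num, syscall))
--         elif any(op in syscall for op in ['mmap', 'mprotect', 'brk']):
--             categories['memory'].append((line_num, syscall))
--         else:
--             categories['other'].append((line_num, syscall))
--
--     return categories
-- ===== SOURCE B (Python) =====
-- def categorize_syscalls(syscalls):
--     """Categorize syscalls by type for better analysis."""
--     rules = [('write_ops', ('write(', 'pwrite')),
--              ('read_ops', ('read(', 'pread')),
--              ('seek_ops', ('lseek(',)),
--              ('file_ops', ('open', 'close', 'mkdir', 'fsync', 'fstat')),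
--              ('memory', ('mmap', 'mprotect', 'brk'))]
--
--     def cat(s):
--         for name, pats in rules:
--             if any(p in s for p in pats):
--                 return name
--         return 'other'
--
--     return {name: [e for e in syscalls if cat(e[1]) == name]
--             for name in ('file_ops', 'memory', 'write_ops', 'read_ops', 'seek_ops', 'other')}
-- ===== Notes on version B (the rewrite author's own statement) =====
-- stated objective: simpler
-- what changed: Replaces A's single pass that mutates a six-bucket dict via an if/elif chain with a pure first-match classifier over a rules table plus one filter pass per category, assembled by a dict comprehension in A's key order.
import Mathlib
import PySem

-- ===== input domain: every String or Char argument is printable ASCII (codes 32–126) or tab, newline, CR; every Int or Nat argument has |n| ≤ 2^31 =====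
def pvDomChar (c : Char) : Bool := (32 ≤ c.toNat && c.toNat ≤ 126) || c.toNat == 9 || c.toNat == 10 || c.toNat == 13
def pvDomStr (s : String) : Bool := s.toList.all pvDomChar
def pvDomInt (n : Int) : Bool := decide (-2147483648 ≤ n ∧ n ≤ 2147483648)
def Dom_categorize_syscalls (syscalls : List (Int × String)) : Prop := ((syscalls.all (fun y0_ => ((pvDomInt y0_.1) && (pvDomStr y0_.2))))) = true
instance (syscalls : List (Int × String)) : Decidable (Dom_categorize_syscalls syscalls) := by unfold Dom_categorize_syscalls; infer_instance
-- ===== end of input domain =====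

set_option maxHeartbeats 800000


-- B replaces A's single pass mutating a six-bucket dict by a pure first-match classifier plus
-- one filter pass per category (objective: simpler/idiomatic); identical value and key order.

-- ===== PORT A =====
-- the loop body of A: the if/elif chain appending (line_num, syscall) to the matching bucket
def pvAStep (d : PySem.Dict String (List (Int × String))) (p : Int × String) :
    PySem.Dict String (List (Int × String)) :=
  if ["write(", "pwrite"].any (fun op => PySem.Str.isIn op p.2) then
    d.modify "write_ops" [] (· ++ [p])
  else if ["read(", "pread"].any (fun op => PySem.Str.isIn op p.2) then
    d.modify "read_ops" [] (· ++ [p])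
  else if PySem.Str.isIn "lseek(" p.2 then
    d.modify "seek_ops" [] (· ++ [p])
  else if ["open", "close", "mkdir", "fsync", "fstat"].any (fun op => PySem.Str.isIn op p.2) then
    d.modify "file_ops" [] (· ++ [p])
  else if ["mmap", "mprotect", "brk"].any (fun op => PySem.Str.isIn op p.2) then
    d.modify "memory" [] (· ++ [p])
  else
    d.modify "other" [] (· ++ [p])

def categorize_syscalls (syscalls : List (Int × String)) : List (String × List (Int × String)) :=
  (syscalls.foldl pvAStep
    (PySem.Dict.mk [("file_ops", []), ("memory", []), ("write_ops", []),
                    ("read_ops", []), ("seek_ops", []), ("other", [])])).items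

-- ===== PORT B =====
def pvRules : List (String × List String) :=
  [("write_ops", ["write(", "pwrite"]),
   ("read_ops", ["read(", "pread"]),
   ("seek_ops", ["lseek("]),
   ("file_ops", ["open", "close", "mkdir", "fsync", "fstat"]),
   ("memory", ["mmap", "mprotect", "brk"])]

-- Source B's 'cat': name of the first rule one of whose patterns occurs in s, else 'other'
def pvCat (rules : List (String × List String)) (s : String) : String :=
  match rules with
  | [] => "other"
  | (name, pats) :: rest =>
    if pats.any (fun p => PySem.Str.isIn p s) then name else pvCat rest s

def categorize_syscalls_alt (syscalls : List (Int × String)) : List (String × List (Int × String)) :=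
  ["file_ops", "memory", "write_ops", "read_ops", "seek_ops", "other"].map
    (fun name => (name, syscalls.filter (fun e => pvCat pvRules e.2 == name)))

-- ===== PRECONDITION & SPEC =====
def Spec_categorize_syscalls (syscalls : List (Int × String)) (out : List (String × List (Int × String))) : Prop := out = categorize_syscalls_alt syscalls
instance (syscalls : List (Int × String)) (out : List (String × List (Int × String))) : Decidable (Spec_categorize_syscalls syscalls out) := by unfold Spec_categorize_syscalls; infer_instance

-- ===== CLAIM (what is proved, stated in full; the proofs are below) =====
def Claim_equal_categorize_syscalls : Prop := ∀ (syscalls : List (Int × String)), Dom_categorize_syscalls syscalls → Spec_categorize_syscalls syscalls (categorize_syscalls syscalls)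

-- ===== LEMMAS AND PROOFS =====

-- evaluating A's dict update on the six-bucket literal dict, one lemma per bucket
lemma pvMod_write (l1 l2 l3 l4 l5 l6 : List (Int × String)) (x : Int × String) :
    (PySem.Dict.mk [("file_ops", l1), ("memory", l2), ("write_ops", l3),
      ("read_ops", l4), ("seek_ops", l5), ("other", l6)]).modify "write_ops" [] (· ++ [x]) =
    PySem.Dict.mk [("file_ops", l1), ("memory", l2), ("write_ops", l3 ++ [x]),
      ("read_ops", l4), ("seek_ops", l5), ("other", l6)] := by
  simp [PySem.Dict.modify, PySem.Dict.insert, PySem.Dict.getD, PySem.Dict.get?,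
    PySem.Dict.contains]

lemma pvMod_read (l1 l2 l3 l4 l5 l6 : List (Int × String)) (x : Int × String) :
    (PySem.Dict.mk [("file_ops", l1), ("memory", l2), ("write_ops", l3),
      ("read_ops", l4), ("seek_ops", l5), ("other", l6)]).modify "read_ops" [] (· ++ [x]) =
    PySem.Dict.mk [("file_ops", l1), ("memory", l2), ("write_ops", l3),
      ("read_ops", l4 ++ [x]), ("seek_ops", l5), ("other", l6)] := by
  simp [PySem.Dict.modify, PySem.Dict.insert, PySem.Dict.getD, PySem.Dict.get?,
    PySem.Dict.contains]

lemma pvMod_seek (l1 l2 l3 l4 l5 l6 : List (Int × String)) (x : Int × String) :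
    (PySem.Dict.mk [("file_ops", l1), ("memory", l2), ("write_ops", l3),
      ("read_ops", l4), ("seek_ops", l5), ("other", l6)]).modify "seek_ops" [] (· ++ [x]) =
    PySem.Dict.mk [("file_ops", l1), ("memory", l2), ("write_ops", l3),
      ("read_ops", l4), ("seek_ops", l5 ++ [x]), ("other", l6)] := by
  simp [PySem.Dict.modify, PySem.Dict.insert, PySem.Dict.getD, PySem.Dict.get?,
    PySem.Dict.contains]

lemma pvMod_file (l1 l2 l3 l4 l5 l6 : List (Int × String)) (x : Int × String) :
    (PySem.Dict.mk [("file_ops", l1), ("memory", l2), ("write_ops", l3),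
      ("read_ops", l4), ("seek_ops", l5), ("other", l6)]).modify "file_ops" [] (· ++ [x]) =
    PySem.Dict.mk [("file_ops", l1 ++ [x]), ("memory", l2), ("write_ops", l3),
      ("read_ops", l4), ("seek_ops", l5), ("other", l6)] := by
  simp [PySem.Dict.modify, PySem.Dict.insert, PySem.Dict.getD, PySem.Dict.get?,
    PySem.Dict.contains]

lemma pvMod_mem (l1 l2 l3 l4 l5 l6 : List (Int × String)) (x : Int × String) :
    (PySem.Dict.mk [("file_ops", l1), ("memory", l2), ("write_ops", l3),
      ("read_ops", l4), ("seek_ops", l5), ("other", l6)]).modify "memory" [] (· ++ [x]) =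
    PySem.Dict.mk [("file_ops", l1), ("memory", l2 ++ [x]), ("write_ops", l3),
      ("read_ops", l4), ("seek_ops", l5), ("other", l6)] := by
  simp [PySem.Dict.modify, PySem.Dict.insert, PySem.Dict.getD, PySem.Dict.get?,
    PySem.Dict.contains]

lemma pvMod_other (l1 l2 l3 l4 l5 l6 : List (Int × String)) (x : Int × String) :
    (PySem.Dict.mk [("file_ops", l1), ("memory", l2), ("write_ops", l3),
      ("read_ops", l4), ("seek_ops", l5), ("other", l6)]).modify "other" [] (· ++ [x]) =
    PySem.Dict.mk [("file_ops", l1), ("memory", l2), ("write_ops", l3),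
      ("read_ops", l4), ("seek_ops", l5), ("other", l6 ++ [x])] := by
  simp [PySem.Dict.modify, PySem.Dict.insert, PySem.Dict.getD, PySem.Dict.get?,
    PySem.Dict.contains]

-- evaluating B's classifier under each branch of A's if/elif chain
lemma pvCat_write (s : String)
    (h1 : (["write(", "pwrite"].any fun op => PySem.Str.isIn op s) = true) :
    pvCat pvRules s = "write_ops" := by
  simp only [pvCat, pvRules]; rw [if_pos h1]

lemma pvCat_read (s : String)
    (h1 : ¬(["write(", "pwrite"].any fun op => PySem.Str.isIn op s) = true)
    (h2 : (["read(", "pread"].any fun op => PySem.Str.isIn op s) = true) :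
    pvCat pvRules s = "read_ops" := by
  simp only [pvCat, pvRules]; rw [if_neg h1, if_pos h2]

lemma pvCat_seek (s : String)
    (h1 : ¬(["write(", "pwrite"].any fun op => PySem.Str.isIn op s) = true)
    (h2 : ¬(["read(", "pread"].any fun op => PySem.Str.isIn op s) = true)
    (h3 : PySem.Str.isIn "lseek(" s = true) :
    pvCat pvRules s = "seek_ops" := by
  simp only [pvCat, pvRules]; rw [if_neg h1, if_neg h2, if_pos (by simpa using h3)]

lemma pvCat_file (s : String)
    (h1 : ¬(["write(", "pwrite"].any fun op => PySem.Str.isIn op s) = true)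
    (h2 : ¬(["read(", "pread"].any fun op => PySem.Str.isIn op s) = true)
    (h3 : ¬PySem.Str.isIn "lseek(" s = true)
    (h4 : (["open", "close", "mkdir", "fsync", "fstat"].any fun op => PySem.Str.isIn op s) = true) :
    pvCat pvRules s = "file_ops" := by
  simp only [pvCat, pvRules]
  rw [if_neg h1, if_neg h2, if_neg (by simpa using h3), if_pos h4]

lemma pvCat_mem (s : String)
    (h1 : ¬(["write(", "pwrite"].any fun op => PySem.Str.isIn op s) = true)
    (h2 : ¬(["read(", "pread"].any fun op => PySem.Str.isIn op s) = true)
    (h3 : ¬PySem.Str.isIn "lseek(" s = true)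
    (h4 : ¬(["open", "close", "mkdir", "fsync", "fstat"].any fun op => PySem.Str.isIn op s) = true)
    (h5 : (["mmap", "mprotect", "brk"].any fun op => PySem.Str.isIn op s) = true) :
    pvCat pvRules s = "memory" := by
  simp only [pvCat, pvRules]
  rw [if_neg h1, if_neg h2, if_neg (by simpa using h3), if_neg h4, if_pos h5]

lemma pvCat_other (s : String)
    (h1 : ¬(["write(", "pwrite"].any fun op => PySem.Str.isIn op s) = true)
    (h2 : ¬(["read(", "pread"].any fun op => PySem.Str.isIn op s) = true)
    (h3 : ¬PySem.Str.isIn "lseek(" s = true)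
    (h4 : ¬(["open", "close", "mkdir", "fsync", "fstat"].any fun op => PySem.Str.isIn op s) = true)
    (h5 : ¬(["mmap", "mprotect", "brk"].any fun op => PySem.Str.isIn op s) = true) :
    pvCat pvRules s = "other" := by
  simp only [pvCat, pvRules]
  rw [if_neg h1, if_neg h2, if_neg (by simpa using h3), if_neg h4, if_neg h5]

-- the invariant: A's fold from arbitrary bucket contents appends per-category filters
lemma pvFold_eq (l : List (Int × String)) (l1 l2 l3 l4 l5 l6 : List (Int × String)) :
    (l.foldl pvAStep
      (PySem.Dict.mk [("file_ops", l1), ("memory", l2), ("write_ops", l3),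
                      ("read_ops", l4), ("seek_ops", l5), ("other", l6)])).items =
    [("file_ops", l1 ++ l.filter (fun e => pvCat pvRules e.2 == "file_ops")),
     ("memory", l2 ++ l.filter (fun e => pvCat pvRules e.2 == "memory")),
     ("write_ops", l3 ++ l.filter (fun e => pvCat pvRules e.2 == "write_ops")),
     ("read_ops", l4 ++ l.filter (fun e => pvCat pvRules e.2 == "read_ops")),
     ("seek_ops", l5 ++ l.filter (fun e => pvCat pvRules e.2 == "seek_ops")),
     ("other", l6 ++ l.filter (fun e => pvCat pvRules e.2 == "other"))] := by
  induction l generalizing l1 l2 l3 l4 l5 l6 with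
  | nil => simp
  | cons x xs ih =>
    simp only [List.foldl_cons, pvAStep]
    split_ifs with h1 h2 h3 h4 h5
    · rw [pvMod_write, ih]; simp [pvCat_write x.2 h1]
    · rw [pvMod_read, ih]; simp [pvCat_read x.2 h1 h2]
    · rw [pvMod_seek, ih]; simp [pvCat_seek x.2 h1 h2 h3]
    · rw [pvMod_file, ih]; simp [pvCat_file x.2 h1 h2 h3 h4]
    · rw [pvMod_mem, ih]; simp [pvCat_mem x.2 h1 h2 h3 h4 h5]
    · rw [pvMod_other, ih]; simp [pvCat_other x.2 h1 h2 h3 h4 h5]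

-- ===== VERDICT (by name: the statement is the Claim_ definition above) =====
theorem categorize_syscalls_spec : Claim_equal_categorize_syscalls := by
  intro syscalls _
  unfold Spec_categorize_syscalls categorize_syscalls categorize_syscalls_alt
  simpa using pvFold_eq syscalls [] [] [] [] [] []
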